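-- pv_equiv track=rewrite | github.com/barslmn/macaw | app.py | add_indel_peaks
-- ===== SOURCE A (Python) =====
-- def add_indel_peaks(peaks, trace_seq):
--     for i, char in enumerate(trace_seq):
--         # slide every peak to right for every deletion
--         if char == "-":
--             peak = peaks[i]
--             if i > 0:
--                 peak_diff = peak - peaks[i - 1]
--             else:
--                 peak_diff = peak
--             peaks = peaks[:i] + [p + peak_diff for p in peaks[i:]]
--             peaks.insert(i, peak)
--     return peaks
-- ===== SOURCE B (Python) =====
-- def add_indel_peaks(peaks, trace_seq):
--     # One left-to-right pass: accumulated shift `off`, finalized prefix `out`,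
--     # instead of A's per-deletion slice + shifted-suffix rebuild + insert.
--     out = []
--     off = 0
--     k = 0          # next unconsumed index in the original peaks
--     prev = 0       # value of the previous finalized position
--     for i, char in enumerate(trace_seq):
--         if char == "-":
--             v = peaks[k] + off
--             diff = v - prev if i > 0 else v
--             off += diff
--             out.append(v)
--             prev = v
--         elif k < len(peaks):
--             v = peaks[k] + off
--             out.append(v)
--             prev = v
--             k += 1
--     out.extend(p + off for p in peaks[k:])
--     return out
-- ===== Notes on version B (the rewrite author's own statement) =====
-- stated objective: alternative
-- what changed: A rebuilds the whole remaining suffix (slice + shifted list comprehension + insert) for every '-' in the trace; B never rebuilds: it makes a single left-to-right pass that carries an accumulated shift offset and appends each finalized peak exactly once.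
import Mathlib
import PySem

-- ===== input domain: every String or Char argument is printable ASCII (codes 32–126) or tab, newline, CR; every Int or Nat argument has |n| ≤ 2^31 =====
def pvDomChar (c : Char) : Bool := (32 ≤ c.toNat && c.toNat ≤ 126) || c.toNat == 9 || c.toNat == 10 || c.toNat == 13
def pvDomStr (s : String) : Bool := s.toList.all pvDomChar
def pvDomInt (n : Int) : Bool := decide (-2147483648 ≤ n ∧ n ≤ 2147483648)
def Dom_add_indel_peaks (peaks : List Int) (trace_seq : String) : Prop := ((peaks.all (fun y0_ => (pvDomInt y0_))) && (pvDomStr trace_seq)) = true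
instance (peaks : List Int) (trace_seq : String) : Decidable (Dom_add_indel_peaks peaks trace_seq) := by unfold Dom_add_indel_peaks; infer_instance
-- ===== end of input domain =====

-- B replaces A's per-deletion suffix-rebuild (slice + shifted comprehension + insert) by a
-- single left-to-right pass with an accumulated offset, building the result incrementally.

-- ===== PORT A =====
-- loop body of A: recursion over the characters with the enumerate index i,
-- state = the current (mutated) peaks list
def add_indel_peaks_go (cs : List Char) (i : Nat) (pks : List Int) : List Int :=
  match cs with
  | [] => pks
  | c :: rest =>
    if c = '-' then
      match PySem.List.pyGet? pks (i : Int) with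
      | none => pks  -- Python raises IndexError here; excluded by Pre_
      | some peak =>
        let peak_diff : Int :=
          if i > 0 then
            match PySem.List.pyGet? pks ((i : Int) - 1) with
            | none => peak  -- unreachable: i - 1 is in range whenever i is
            | some q => peak - q
          else peak
        let pks' := PySem.List.slice pks none (some (i : Int)) ++
                    (PySem.List.slice pks (some (i : Int)) none).map (fun p => p + peak_diff)
        add_indel_peaks_go rest (i + 1) (PySem.List.insert pks' (i : Int) peak)
    else add_indel_peaks_go rest (i + 1) pks

def add_indel_peaks (peaks : List Int) (trace_seq : String) : List Int :=
  add_indel_peaks_go trace_seq.toList 0 peaks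

-- ===== PORT B =====
-- loop body of B: one pass, state = (finalized prefix `out`, accumulated offset `off`,
-- next original index `k`, previous finalized value `prev`)
def add_indel_peaks_alt_go (peaks : List Int) (cs : List Char) (i : Nat)
    (out : List Int) (off : Int) (k : Nat) (prev : Int) : List Int :=
  match cs with
  | [] => out ++ (peaks.drop k).map (fun p => p + off)
  | c :: rest =>
    if c = '-' then
      match peaks[k]? with
      | none => out  -- Python raises IndexError here; excluded by Pre_
      | some pk =>
        let v := pk + off
        let diff := if i > 0 then v - prev else v
        add_indel_peaks_alt_go peaks rest (i + 1) (out ++ [v]) (off + diff) k v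
    else if k < peaks.length then
      let v := peaks.getD k 0 + off
      add_indel_peaks_alt_go peaks rest (i + 1) (out ++ [v]) off (k + 1) v
    else add_indel_peaks_alt_go peaks rest (i + 1) out off k prev

def add_indel_peaks_alt (peaks : List Int) (trace_seq : String) : List Int :=
  add_indel_peaks_alt_go peaks trace_seq.toList 0 [] 0 0 0

-- ===== PRECONDITION & SPEC =====
-- Pre_ excludes exactly the inputs on which A raises IndexError: a '-' at a position i of the
-- trace such that the number of non-'-' characters before i is at least len(peaks).
def Pre_add_indel_peaks (peaks : List Int) (trace_seq : String) : Prop :=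
  ∀ i, i < trace_seq.toList.length → trace_seq.toList.getD i ' ' = '-' →
    (trace_seq.toList.take i).countP (· != '-') < peaks.length

instance (peaks : List Int) (trace_seq : String) : Decidable (Pre_add_indel_peaks peaks trace_seq) := by
  unfold Pre_add_indel_peaks; infer_instance

def pvWitness_add_indel_peaks : List Int × String := ([10, 20, 30], "A-C")

def Spec_add_indel_peaks (peaks : List Int) (trace_seq : String) (out : List Int) : Prop := out = add_indel_peaks_alt peaks trace_seq
instance (peaks : List Int) (trace_seq : String) (out : List Int) : Decidable (Spec_add_indel_peaks peaks trace_seq out) := by unfold Spec_add_indel_peaks; infer_instance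

-- ===== CLAIM (what is proved, stated in full; the proofs are below) =====
def Claim_equal_add_indel_peaks : Prop := ∀ (peaks : List Int) (trace_seq : String), Dom_add_indel_peaks peaks trace_seq → Pre_add_indel_peaks peaks trace_seq → Spec_add_indel_peaks peaks trace_seq (add_indel_peaks peaks trace_seq)

-- ===== LEMMAS AND PROOFS =====

lemma add_indel_peaks_go_eq (peaks : List Int) (cs : List Char) :
    ∀ (i : Nat) (out : List Int) (off : Int) (k : Nat) (prev : Int),
      (∀ j, j < cs.length → cs.getD j ' ' = '-' →
        k + (cs.take j).countP (· != '-') < peaks.length) →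
      k ≤ peaks.length →
      out.length ≤ i →
      (out.length < i → k = peaks.length) →
      (out = [] ∨ out.getLast? = some prev) →
      add_indel_peaks_go cs i (out ++ (peaks.drop k).map (fun p => p + off))
        = add_indel_peaks_alt_go peaks cs i out off k prev := by
  induction cs with
  | nil => intro i out off k prev _ _ _ _ _; rfl
  | cons c rest ih =>
    intro i out off k prev H hk hle hlt hprev
    by_cases hc : c = '-'
    · -- deletion step
      subst hc
      have hklt : k < peaks.length := by
        have := H 0 (by simp) (by simp); simpa using this
      have hi : out.length = i := by
        rcases Nat.lt_or_ge out.length i with h | h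
        · exact absurd (hlt h) (by omega)
        · omega
      have hgetk : peaks.drop k = peaks[k] :: peaks.drop (k + 1) :=
        List.drop_eq_getElem_cons hklt
      have hA : PySem.List.pyGet?
          (out ++ (peaks.drop k).map (fun p => p + off)) (i : Int)
          = some (peaks[k] + off) := by
        rw [PySem.List.pyGet?_natCast, ← hi,
          List.getElem?_append_right (by omega), Nat.sub_self, hgetk]
        simp
      have hB : peaks[k]? = some peaks[k] := List.getElem?_eq_getElem hklt
      have hprev' : i > 0 → PySem.List.pyGet?
          (out ++ (peaks.drop k).map (fun p => p + off)) ((i : Int) - 1)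
          = some prev := by
        intro hipos
        have hne : out ≠ [] := by
          intro h; rw [h] at hi; simp at hi; omega
        rcases hprev with h | h
        · exact absurd h hne
        · rw [show ((i : Int) - 1) = ((i - 1 : Nat) : Int) by omega,
            PySem.List.pyGet?_natCast, List.getElem?_append_left (by omega),
            ← hi, ← List.getLast?_eq_getElem?, h]
      simp only [add_indel_peaks_go, add_indel_peaks_alt_go, hA, hB]
      set d : Int := (if i > 0 then
          match PySem.List.pyGet?
            (out ++ (peaks.drop k).map (fun p => p + off)) ((i : Int) - 1) with
          | none => peaks[k] + off
          | some q => peaks[k] + off - q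
        else peaks[k] + off) with hd
      have hdeq : d = (if i > 0 then peaks[k] + off - prev else peaks[k] + off) := by
        rw [hd]
        rcases Nat.eq_zero_or_pos i with h0 | h0
        · simp [h0]
        · rw [if_pos h0, if_pos h0, hprev' h0]
      have hslice1 : PySem.List.slice
          (out ++ (peaks.drop k).map (fun p => p + off)) none (some (i : Int)) = out := by
        rw [PySem.List.slice_to_natCast, ← hi]; exact List.take_left
      have hslice2 : PySem.List.slice
          (out ++ (peaks.drop k).map (fun p => p + off)) (some (i : Int)) none
          = (peaks.drop k).map (fun p => p + off) := by
        rw [PySem.List.slice_from_natCast, ← hi]; exact List.drop_left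
      have hmap : ((peaks.drop k).map (fun p => p + off)).map (fun p => p + d)
          = (peaks.drop k).map (fun p => p + (off + d)) := by
        rw [List.map_map]; apply List.map_congr_left; intro x _
        simp [Function.comp]; ring
      have hins : PySem.List.insert
          (out ++ (peaks.drop k).map (fun p => p + (off + d))) (i : Int) (peaks[k] + off)
          = out ++ (peaks[k] + off) :: (peaks.drop k).map (fun p => p + (off + d)) := by
        rw [PySem.List.insert_natCast _ i _ (by simp [← hi]), ← hi,
          List.take_left, List.drop_left]
      rw [hslice1, hslice2, hmap, hins]
      have hrec := ih (i + 1) (out ++ [peaks[k] + off]) (off + d) k (peaks[k] + off)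
        (by
          intro j hj hdash
          have := H (j + 1) (by simpa using hj) (by simpa using hdash)
          simp only [List.take_succ_cons, List.countP_cons] at this
          simpa using this)
        hk (by simp; omega) (by simp; omega) (Or.inr (by simp))
      rw [List.append_assoc] at hrec
      simp only [List.singleton_append] at hrec
      rw [hrec, hdeq]
      simp
    · -- non-deletion step
      simp only [add_indel_peaks_go, add_indel_peaks_alt_go, if_neg hc]
      by_cases hkl : k < peaks.length
      · rw [if_pos hkl]
        have hi : out.length = i := by
          rcases Nat.lt_or_ge out.length i with h | h
          · exact absurd (hlt h) (by omega)
          · omega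
        have hgetk : peaks.drop k = peaks[k] :: peaks.drop (k + 1) :=
          List.drop_eq_getElem_cons hkl
        have hgd : peaks.getD k 0 = peaks[k] := List.getD_eq_getElem peaks 0 hkl
        have hrec := ih (i + 1) (out ++ [peaks[k] + off]) off (k + 1) (peaks[k] + off)
          (by
            intro j hj hdash
            have := H (j + 1) (by simpa using hj) (by simpa using hdash)
            simp only [List.take_succ_cons, List.countP_cons] at this
            have hcne : (c != '-') = true := by simpa using hc
            simp [hcne] at this; omega)
          (by omega) (by simp; omega) (by simp; omega) (Or.inr (by simp))
        rw [List.append_assoc] at hrec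
        simp only [List.singleton_append] at hrec
        rw [hgd, hgetk, List.map_cons, hrec]
      · rw [if_neg hkl]
        exact ih (i + 1) out off k prev
          (by
            intro j hj hdash
            have := H (j + 1) (by simpa using hj) (by simpa using hdash)
            simp only [List.take_succ_cons, List.countP_cons] at this
            have hcne : (c != '-') = true := by simpa using hc
            simp [hcne] at this; omega)
          hk (by omega) (fun _ => by omega) hprev

-- ===== VERDICT (by name: the statement is the Claim_ definition above) =====
theorem add_indel_peaks_spec : Claim_equal_add_indel_peaks := by
  intro peaks s _ hpre
  unfold Spec_add_indel_peaks add_indel_peaks add_indel_peaks_alt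
  have h := add_indel_peaks_go_eq peaks s.toList 0 [] 0 0 0
    (by simpa using hpre) (by simp) (by simp) (by simp) (Or.inl rfl)
  simpa using h
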